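-- pv_equiv track=rewrite | github.com/mapproxy/mapproxy | mapproxy/util/ogcapi.py | find_href_in_links
-- ===== SOURCE A (Python) =====
-- def find_href_in_links(links, rel, preferred_media_type):
--     href = None
--     for link in links:
--         if link["rel"] == rel:
--             if "type" in link and link["type"] == preferred_media_type:
--                 href = link["href"]
--                 break
--             elif "type" not in link:
--                 if href is None:
--                     href = link["href"]
--     return href
-- ===== SOURCE B (Python) =====
-- def find_href_in_links(links, rel, preferred_media_type):
--     # First pass: first link with matching rel whose "type" equals the
--     # preferred media type wins outright (the original breaks on it).
--     for link in links:
--         if link["rel"] == rel and "type" in link and link["type"] == preferred_media_type: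
--             return link["href"]
--     # Second pass: otherwise the first matching link without a "type".
--     for link in links:
--         if link["rel"] == rel and "type" not in link:
--             return link["href"]
--     return None
-- ===== Notes on version B (the rewrite author's own statement) =====
-- stated objective: simpler
-- what changed: Replaces A's single loop with a mutable href accumulator and break by two stateless ordered scans: return the first exact rel+media-type match, else the first rel match without a type, else None.
-- crash fix: A raises KeyError('href') when the first untyped rel-matching link lacks 'href' but a complete exact match follows; B returns that exact match's href. — e.g. on find_href_in_links([[("rel", "x")], [("rel", "x"), ("type", "t"), ("href", "H")]], "x", "t"): A raises KeyError, B returns some "H"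
import Mathlib
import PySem

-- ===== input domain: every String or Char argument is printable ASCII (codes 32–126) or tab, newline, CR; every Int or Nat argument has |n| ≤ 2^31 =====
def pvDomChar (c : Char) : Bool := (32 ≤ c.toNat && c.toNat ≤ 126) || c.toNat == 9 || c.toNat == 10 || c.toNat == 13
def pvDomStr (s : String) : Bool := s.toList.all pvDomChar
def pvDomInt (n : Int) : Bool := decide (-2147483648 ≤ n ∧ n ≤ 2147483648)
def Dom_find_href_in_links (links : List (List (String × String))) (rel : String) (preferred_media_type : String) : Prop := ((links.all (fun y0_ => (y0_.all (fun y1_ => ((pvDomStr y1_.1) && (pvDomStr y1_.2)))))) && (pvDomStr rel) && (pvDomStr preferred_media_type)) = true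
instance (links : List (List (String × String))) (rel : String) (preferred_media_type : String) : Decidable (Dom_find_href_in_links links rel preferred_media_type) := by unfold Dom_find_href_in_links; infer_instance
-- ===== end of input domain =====

-- B replaces A's single stateful loop (mutable href + break) with two stateless
-- ordered scans: first the exact-media-type match, then the first untyped match
-- (objective: simpler).

-- shared dict primitives (a link is a dict modelled as an association list)
def pvGet (link : List (String × String)) (k : String) : Option String :=
  (PySem.Dict.mk link).get? k
def pvHas (link : List (String × String)) (k : String) : Bool :=
  (PySem.Dict.mk link).contains k

-- ===== PORT A =====
-- literal transliteration of A's loop: href accumulator, break on exact match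
def pvGoA (rel preferred_media_type : String) :
    List (List (String × String)) → Option String → Option String
  | [], href => href
  | link :: rest, href =>
    if pvGet link "rel" == some rel then
      if pvHas link "type" && (pvGet link "type" == some preferred_media_type) then
        pvGet link "href"                    -- href = link["href"]; break
      else if !pvHas link "type" then
        pvGoA rel preferred_media_type rest
          (if href.isNone then pvGet link "href" else href)
      else
        pvGoA rel preferred_media_type rest href
    else
      pvGoA rel preferred_media_type rest href

def find_href_in_links (links : List (List (String × String))) (rel : String) (preferred_media_type : String) : Option String :=
  pvGoA rel preferred_media_type links none

-- ===== PORT B =====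
def pvExact (rel preferred_media_type : String) (link : List (String × String)) : Bool :=
  (pvGet link "rel" == some rel) && (pvHas link "type" && (pvGet link "type" == some preferred_media_type))
def pvUntyped (rel : String) (link : List (String × String)) : Bool :=
  (pvGet link "rel" == some rel) && !pvHas link "type"

def find_href_in_links_alt (links : List (List (String × String))) (rel : String) (preferred_media_type : String) : Option String :=
  match links.find? (pvExact rel preferred_media_type) with
  | some link => pvGet link "href"
  | none =>
    match links.find? (pvUntyped rel) with
    | some link => pvGet link "href"
    | none => none

-- ===== PRECONDITION & SPEC =====
-- Pre_ excludes exactly the inputs on which the Python A raises KeyError: some link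
-- scanned before the breaking exact match lacks "rel", or the breaking exact match
-- lacks "href", or the first untyped rel-match scanned lacks "href".
def Pre_find_href_in_links (links : List (List (String × String))) (rel : String) (preferred_media_type : String) : Prop :=
  (∀ link ∈ links.takeWhile (fun l => !pvExact rel preferred_media_type l), pvHas link "rel" = true) ∧
  ((links.dropWhile (fun l => !pvExact rel preferred_media_type l)).head?.all (fun l => pvHas l "href") = true) ∧
  (((links.takeWhile (fun l => !pvExact rel preferred_media_type l)).find? (pvUntyped rel)).all (fun l => pvHas l "href") = true)
instance (links : List (List (String × String))) (rel : String) (preferred_media_type : String) : Decidable (Pre_find_href_in_links links rel preferred_media_type) := by unfold Pre_find_href_in_links; infer_instance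

def pvWitness_find_href_in_links : (List (List (String × String))) × String × String :=
  ([[("rel", "x"), ("href", "H")], [("rel", "x"), ("type", "t"), ("href", "G")]], "x", "t")

-- A raises KeyError ("href") when the first untyped rel-match lacks "href" but a
-- complete exact match follows; B returns that exact match's href.
def Raises_find_href_in_links (links : List (List (String × String))) (rel : String) (preferred_media_type : String) : Prop :=
  (∀ link ∈ links.takeWhile (fun l => !pvExact rel preferred_media_type l), pvHas link "rel" = true) ∧
  ((links.dropWhile (fun l => !pvExact rel preferred_media_type l)).head?.all (fun l => pvHas l "href") = true) ∧
  ((links.dropWhile (fun l => !pvExact rel preferred_media_type l)).head?.isSome = true) ∧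
  (((links.takeWhile (fun l => !pvExact rel preferred_media_type l)).find? (pvUntyped rel)).any (fun l => !pvHas l "href") = true)
instance (links : List (List (String × String))) (rel : String) (preferred_media_type : String) : Decidable (Raises_find_href_in_links links rel preferred_media_type) := by unfold Raises_find_href_in_links; infer_instance

def pvRaiseWitness_find_href_in_links : (List (List (String × String))) × String × String :=
  ([[("rel", "x")], [("rel", "x"), ("type", "t"), ("href", "H")]], "x", "t")
def pvRaiseWitnessOut_find_href_in_links : Option String := some "H"

def Spec_find_href_in_links (links : List (List (String × String))) (rel : String) (preferred_media_type : String) (out : Option String) : Prop := out = find_href_in_links_alt links rel preferred_media_type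
instance (links : List (List (String × String))) (rel : String) (preferred_media_type : String) (out : Option String) : Decidable (Spec_find_href_in_links links rel preferred_media_type out) := by unfold Spec_find_href_in_links; infer_instance

-- ===== CLAIM (what is proved, stated in full; the proofs are below) =====
def Claim_equal_find_href_in_links : Prop := ∀ (links : List (List (String × String))) (rel : String) (preferred_media_type : String), Dom_find_href_in_links links rel preferred_media_type → Pre_find_href_in_links links rel preferred_media_type → Spec_find_href_in_links links rel preferred_media_type (find_href_in_links links rel preferred_media_type)

def Claim_raises_find_href_in_links : Prop := (∀ (links : List (List (String × String))) (rel : String) (preferred_media_type : String), Dom_find_href_in_links links rel preferred_media_type → Raises_find_href_in_links links rel preferred_media_type → ¬ Pre_find_href_in_links links rel preferred_media_type) ∧ (Dom_find_href_in_links (pvRaiseWitness_find_href_in_links.1) (pvRaiseWitness_find_href_in_links.2.1) (pvRaiseWitness_find_href_in_links.2.2) ∧ Raises_find_href_in_links (pvRaiseWitness_find_href_in_links.1) (pvRaiseWitness_find_href_in_links.2.1) (pvRaiseWitness_find_href_in_links.2.2) ∧ find_href_in_links_alt (pvRaiseWitness_find_href_in_links.1) (pvRaiseWitness_find_href_in_links.2.1)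 (pvRaiseWitness_find_href_in_links.2.2) = pvRaiseWitnessOut_find_href_in_links)

-- ===== LEMMAS AND PROOFS =====

lemma pvHas_isSome (link : List (String × String)) (k : String) (h : pvHas link k = true) :
    (pvGet link k).isSome = true := by
  unfold pvHas pvGet at *
  rw [PySem.Dict.contains_eq_isSome_get?] at h
  exact h

-- A's loop, started with accumulator `href`, computed by B's two scans.
lemma pvGoA_eq (rel pmt : String) :
    ∀ (links : List (List (String × String))) (href : Option String),
      (href = none →
        ((links.takeWhile (fun l => !pvExact rel pmt l)).find? (pvUntyped rel)).all
          (fun l => pvHas l "href") = true) →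
      pvGoA rel pmt links href =
        match links.find? (pvExact rel pmt) with
        | some link => pvGet link "href"
        | none =>
          match href with
          | some v => some v
          | none =>
            match links.find? (pvUntyped rel) with
            | some link => pvGet link "href"
            | none => none := by
  intro links
  induction links with
  | nil =>
    intro href _
    cases href <;> simp [pvGoA]
  | cons link rest ih =>
    intro href hunt
    by_cases ha : (pvGet link "rel" == some rel) = true
    · by_cases hb : (pvHas link "type" && (pvGet link "type" == some pmt)) = true
      · -- exact match: break
        have he : pvExact rel pmt link = true := by
          simp [pvExact, ha, hb]
        simp [pvGoA, ha, hb, List.find?, he]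
      · -- rel matches, not the exact media type
        have he : pvExact rel pmt link = false := by
          unfold pvExact
          rw [ha, Bool.true_and]
          exact Bool.of_not_eq_true hb
        by_cases ht : pvHas link "type" = true
        · -- has a type (the wrong one): skipped entirely
          have hu : pvUntyped rel link = false := by
            unfold pvUntyped; rw [ha, ht]; rfl
          have hc : (pvGet link "type" == some pmt) = false := by
            cases hcv : (pvGet link "type" == some pmt) with
            | false => rfl
            | true => exact absurd (by simp [ht, hcv]) hb
          have hrec := ih href (by
            intro h0
            have := hunt h0
            simpa [List.takeWhile, he, List.find?, hu] using this)
          simp [pvGoA, ha, ht, hc, hrec, List.find?, he, hu]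
        · -- untyped rel-match
          have ht' : pvHas link "type" = false := Bool.of_not_eq_true ht
          have hu : pvUntyped rel link = true := by
            unfold pvUntyped; rw [ha, ht']; rfl
          cases href with
          | some v =>
            have hrec := ih (some v) (by intro h0; cases h0)
            simp [pvGoA, ha, ht', hrec, List.find?, he]
          | none =>
            have hhr : pvHas link "href" = true := by
              have := hunt rfl
              simpa [List.takeWhile, he, List.find?, hu] using this
            obtain ⟨w, hw⟩ := Option.isSome_iff_exists.mp (pvHas_isSome link "href" hhr)
            have hrec := ih (some w) (by intro h0; cases h0)
            simp [pvGoA, ha, ht', hw, hrec, List.find?, he, hu]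
    · -- rel does not match: skipped
      have ha' : (pvGet link "rel" == some rel) = false := Bool.of_not_eq_true ha
      have he : pvExact rel pmt link = false := by
        unfold pvExact; rw [ha']; rfl
      have hu : pvUntyped rel link = false := by
        unfold pvUntyped; rw [ha']; rfl
      have hrec := ih href (by
        intro h0
        have := hunt h0
        simpa [List.takeWhile, he, List.find?, hu] using this)
      simp [pvGoA, ha', hrec, List.find?, he, hu]

-- ===== VERDICT (by name: the statement is the Claim_ definition above) =====
theorem find_href_in_links_spec : Claim_equal_find_href_in_links := by
  intro links rel pmt _ hpre
  unfold Spec_find_href_in_links find_href_in_links find_href_in_links_alt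
  rw [pvGoA_eq rel pmt links none (fun _ => hpre.2.2)]

theorem find_href_in_links_raises : Claim_raises_find_href_in_links := by
  unfold Claim_raises_find_href_in_links
  refine ⟨?_, by decide⟩
  intro links rel pmt _ hr hpre
  obtain ⟨-, -, -, hany⟩ := hr
  have hall := hpre.2.2
  cases h : (links.takeWhile (fun l => !pvExact rel pmt l)).find? (pvUntyped rel) with
  | none => rw [h] at hany; cases hany
  | some l =>
    rw [h] at hany hall
    simp only [Option.any, Option.all] at hany hall
    rw [hall] at hany
    cases hany

-- witness self-check, derived from the raises theorem
theorem pvRaiseWitness_find_href_in_links_ok :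
    find_href_in_links_alt (pvRaiseWitness_find_href_in_links.1) (pvRaiseWitness_find_href_in_links.2.1) (pvRaiseWitness_find_href_in_links.2.2) = pvRaiseWitnessOut_find_href_in_links := by
  have h := find_href_in_links_raises
  unfold Claim_raises_find_href_in_links at h
  exact h.2.2.2
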